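-- pv_equiv track=rewrite | github.com/kudinov-fedor/python-core-training | ihontaryk/homework_2/three_words.py | three_words
-- ===== SOURCE A (Python) =====
-- def three_words(text) -> bool:
--     """
--     three_words function
--     checks if the string contains three words in succession
--     """
--
--     if not isinstance(text, str):
--         raise TypeError
--
--     if text == '':
--         raise ValueError
--
--     elements = text.split()
--
--     result = []
--
--     for element in elements:
--         if element.isalpha():
--             result.append(element)
--         else:
--             result = []
--
--         if len(result) >= 3:
--             return True
--         continue
--
--     return False
-- ===== SOURCE B (Python) =====
-- def three_words(text) -> bool:
--     """Windowed re-implementation: check any 3 consecutive alpha words directly."""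
--     if not isinstance(text, str):
--         raise TypeError
--
--     if text == '':
--         raise ValueError
--
--     flags = [word.isalpha() for word in text.split()]
--     return any(flags[i] and flags[i + 1] and flags[i + 2]
--                for i in range(len(flags) - 2))
-- ===== Notes on version B (the rewrite author's own statement) =====
-- stated objective: simpler
-- what changed: Replaces the reset-accumulator list loop with early return by a flag list and a sliding-window any() over all index triples.
import Mathlib
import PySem

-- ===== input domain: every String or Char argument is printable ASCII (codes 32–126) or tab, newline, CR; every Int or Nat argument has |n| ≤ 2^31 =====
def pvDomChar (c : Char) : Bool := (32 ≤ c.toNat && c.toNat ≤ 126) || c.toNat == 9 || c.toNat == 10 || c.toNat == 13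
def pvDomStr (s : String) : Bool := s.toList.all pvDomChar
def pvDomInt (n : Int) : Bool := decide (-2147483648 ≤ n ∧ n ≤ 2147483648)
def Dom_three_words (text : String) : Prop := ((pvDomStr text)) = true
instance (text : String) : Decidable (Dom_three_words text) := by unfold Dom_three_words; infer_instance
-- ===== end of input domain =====

-- B replaces A's reset-accumulator loop (early return) with a sliding-window any() over an isalpha flag list; objective: simpler.


-- ===== PORT A =====
-- the for-loop: accumulator `result` resets on non-alpha, early-returns when len ≥ 3
def threeWordsLoopA : List String → List String → Bool
  | [], _ => false
  | element :: rest, result =>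
    let result' := if PySem.Str.strIsalpha element then result ++ [element] else []
    if 3 ≤ result'.length then true else threeWordsLoopA rest result'

def three_words (text : String) : Bool :=
  threeWordsLoopA (PySem.Str.split₀ text) []

-- ===== PORT B =====
def three_words_alt (text : String) : Bool :=
  let flags := (PySem.Str.split₀ text).map PySem.Str.strIsalpha
  (PySem.List.pyRange 0 ((flags.length : Int) - 2) 1).any (fun i =>
    PySem.List.pyGetD flags i false && PySem.List.pyGetD flags (i + 1) false &&
      PySem.List.pyGetD flags (i + 2) false)

-- ===== PRECONDITION & SPEC =====
-- Pre_ excludes only the empty string, on which A raises ValueError (and B does too).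
def Pre_three_words (text : String) : Prop := text ≠ ""
instance (text : String) : Decidable (Pre_three_words text) := by unfold Pre_three_words; infer_instance
def pvWitness_three_words : String := "a b c"

def Spec_three_words (text : String) (out : Bool) : Prop := out = three_words_alt text
instance (text : String) (out : Bool) : Decidable (Spec_three_words text out) := by unfold Spec_three_words; infer_instance

-- ===== CLAIM (what is proved, stated in full; the proofs are below) =====
def Claim_equal_three_words : Prop := ∀ (text : String), Dom_three_words text → Pre_three_words text → Spec_three_words text (three_words text)

-- ===== LEMMAS AND PROOFS =====

-- "some three consecutive elements are all true", structurally
def hasRun3 : List Bool → Bool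
  | [] => false
  | f :: t => (f && t.getD 0 false && t.getD 1 false) || hasRun3 t

-- B's windowed any computes hasRun3
theorem window_eq_hasRun3 (l : List Bool) :
    ((List.range (l.length - 2)).any fun k =>
      l.getD k false && l.getD (k + 1) false && l.getD (k + 2) false) = hasRun3 l := by
  induction l with
  | nil => simp [hasRun3]
  | cons f t ih =>
    by_cases h2 : 2 ≤ t.length
    · have hlen : (f :: t).length - 2 = (t.length - 2) + 1 := by simp; omega
      rw [hlen, List.range_succ_eq_map, List.any_cons, List.any_map]
      have htail : ((List.range (t.length - 2)).any
          ((fun k => (f :: t).getD k false && (f :: t).getD (k + 1) false && (f :: t).getD (k + 2) false)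
            ∘ Nat.succ)) = hasRun3 t := by
        rw [← ih]
        apply List.any_congr rfl
        intro k
        simp [Function.comp]
      rw [htail]
      simp [hasRun3]
    · rcases t with _ | ⟨b, t'⟩
      · simp [hasRun3]
      · rcases t' with _ | ⟨c, t''⟩
        · simp [hasRun3]
        · simp at h2

-- A's loop computes hasRun3 on the flag list, with the accumulator length prepended as trues
theorem loopA_eq (es : List String) : ∀ (r : List String), r.length ≤ 2 →
    threeWordsLoopA es r
      = hasRun3 (List.replicate r.length true ++ es.map PySem.Str.strIsalpha) := by
  induction es with
  | nil =>
    intro r hr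
    interval_cases h : r.length <;> simp [threeWordsLoopA, hasRun3]
  | cons e rest ih =>
    intro r hr
    simp only [threeWordsLoopA, List.map_cons]
    by_cases hf : PySem.Str.strIsalpha e
    · simp only [hf, if_true]
      by_cases h3 : 3 ≤ (r ++ [e]).length
      · simp only [h3, if_true]
        have hr2 : r.length = 2 := by simp at h3; omega
        rw [hr2]
        simp [hasRun3]
      · simp only [h3, if_false]
        rw [ih _ (by simp at h3 ⊢; omega)]
        have : List.replicate (r ++ [e]).length (true : Bool)
            = List.replicate r.length true ++ [true] := by
          simp [List.replicate_succ']
        rw [this, List.append_assoc]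
        simp
    · have hflag : PySem.Str.strIsalpha e = false := by simpa using hf
      simp only [hflag]
      rw [show (if (false = true) then r ++ [e] else ([] : List String)) = [] from rfl]
      rw [if_neg (by simp), ih [] (by simp)]
      interval_cases h : r.length <;> simp [hasRun3]

theorem windowPy_eq (flags : List Bool) :
    ((PySem.List.pyRange 0 ((flags.length : Int) - 2) 1).any fun i =>
      PySem.List.pyGetD flags i false && PySem.List.pyGetD flags (i + 1) false &&
        PySem.List.pyGetD flags (i + 2) false) = hasRun3 flags := by
  rw [← window_eq_hasRun3 flags]
  rw [PySem.List.pyRange_one]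
  have hlen : ((flags.length : Int) - 2 - 0).toNat = flags.length - 2 := by omega
  rw [hlen, List.any_map]
  apply List.any_congr rfl
  intro k
  simp only [Function.comp, zero_add]
  have h1 : (k : Int) + 1 = ((k + 1 : Nat) : Int) := by push_cast; ring
  have h2 : (k : Int) + 2 = ((k + 2 : Nat) : Int) := by push_cast; ring
  rw [h1, h2]
  simp only [PySem.List.pyGetD_natCast]

theorem alt_eq_hasRun3 (text : String) :
    three_words_alt text = hasRun3 ((PySem.Str.split₀ text).map PySem.Str.strIsalpha) := by
  simp only [three_words_alt]
  exact windowPy_eq _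

-- ===== VERDICT (by name: the statement is the Claim_ definition above) =====
theorem three_words_spec : Claim_equal_three_words := by
  intro text _ _
  unfold Spec_three_words three_words
  rw [alt_eq_hasRun3]
  rw [loopA_eq _ [] (by simp)]
  simp
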